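-- pv_equiv track=rewrite | github.com/EnjunDu/GraphMaster | tricks/data_sample.py | sort_communities_by_size
-- ===== SOURCE A (Python) =====
-- def sort_communities_by_size(partition: dict) -> list:
--     """
--     Returns a sorted list of community numbers from largest to smallest based on community size.
--     :param partition: Louvain community partition result
--     :return: list, community numbers sorted in descending order by size
--     """
--     # Collect community -> Node list
--     community_nodes = {}
--     for node, comm_id in partition.items():
--         community_nodes.setdefault(comm_id, []).append(node)
--
--     # Sort by community size
--     sorted_communities = sorted(
--         community_nodes.keys(),
--         key=lambda c: len(community_nodes[c]),
--         reverse=True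
--     )
--     return sorted_communities
-- ===== SOURCE B (Python) =====
-- def sort_communities_by_size(partition: dict) -> list:
--     """
--     Returns community ids sorted by community size, largest first (stable:
--     equal sizes keep first-appearance order), via a counting/bucket sort.
--     """
--     # One pass: size of each community (insertion order = first appearance)
--     counts = {}
--     for node, comm_id in partition.items():
--         counts[comm_id] = counts.get(comm_id, 0) + 1
--
--     if not counts:
--         return []
--
--     max_size = max(counts.values())
--
--     # Bucket communities by size, first-appearance order inside each bucket
--     buckets = {}
--     for comm_id, size in counts.items():
--         buckets.setdefault(size, []).append(comm_id)
--
--     # Read buckets from the largest size down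
--     result = []
--     for size in range(max_size, 0, -1):
--         result.extend(buckets.get(size, []))
--     return result
-- ===== Notes on version B (the rewrite author's own statement) =====
-- stated objective: alternative
-- what changed: Replaces building node lists per community plus a comparison sort of the keys by list length with a counting/bucket sort: one pass counts community sizes, communities are bucketed by size, and buckets are emitted from the largest size down (same stable tie-break).
import Mathlib
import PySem

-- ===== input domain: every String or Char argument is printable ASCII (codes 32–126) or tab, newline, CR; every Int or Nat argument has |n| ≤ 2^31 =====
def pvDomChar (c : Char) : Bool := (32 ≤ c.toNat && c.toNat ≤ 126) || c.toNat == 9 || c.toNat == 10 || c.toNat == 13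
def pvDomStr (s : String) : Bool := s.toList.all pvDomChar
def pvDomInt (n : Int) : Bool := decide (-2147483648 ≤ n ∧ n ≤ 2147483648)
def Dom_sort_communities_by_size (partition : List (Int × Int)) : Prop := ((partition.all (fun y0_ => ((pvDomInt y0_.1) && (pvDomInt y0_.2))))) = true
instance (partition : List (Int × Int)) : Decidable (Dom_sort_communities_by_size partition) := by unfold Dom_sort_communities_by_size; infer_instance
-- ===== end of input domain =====

-- B replaces A's comparison sort of community ids by member count with a counting/bucket
-- sort (count sizes, bucket ids by size, emit buckets from the largest size down);
-- same result, including the stable first-appearance tie-break.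


-- ===== PORT A =====
def sort_communities_by_size (partition : List (Int × Int)) : List Int :=
  -- community_nodes.setdefault(comm_id, []).append(node)  ==  d[comm_id] = d.get(comm_id, []) + [node]
  let community_nodes : PySem.Dict Int (List Int) :=
    partition.foldl (fun d p => d.modify p.2 [] (fun l => l ++ [p.1])) PySem.Dict.empty
  PySem.List.sorted community_nodes.keys
    (fun c => PySem.List.len (community_nodes.getD c [])) true

-- ===== PORT B =====
def sort_communities_by_size_alt (partition : List (Int × Int)) : List Int :=
  let counts : PySem.Dict Int Int :=
    partition.foldl (fun d p => d.insert p.2 (d.getD p.2 0 + 1)) PySem.Dict.empty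
  if PySem.Dict.size counts = 0 then []    -- if not counts: return []
  else
    let max_size : Int := (PySem.List.max? (PySem.Dict.values counts) (fun v => v)).getD 0
    -- buckets.setdefault(size, []).append(comm_id)
    let buckets : PySem.Dict Int (List Int) :=
      (PySem.Dict.items counts).foldl
        (fun b p => b.modify p.2 [] (fun l => l ++ [p.1])) PySem.Dict.empty
    (PySem.List.pyRange max_size 0 (-1)).foldl
      (fun res v => res ++ buckets.getD v []) []

-- ===== PRECONDITION & SPEC =====
-- Pre_ excludes only lists whose first components (the dict keys) repeat: the Python argument
-- is a dict, whose keys are necessarily distinct, so such lists represent no input A receives.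
def Pre_sort_communities_by_size (partition : List (Int × Int)) : Prop :=
  (partition.map Prod.fst).Nodup
instance (partition : List (Int × Int)) : Decidable (Pre_sort_communities_by_size partition) := by
  unfold Pre_sort_communities_by_size; infer_instance
def pvWitness_sort_communities_by_size : (List (Int × Int)) := [(1, 5), (2, 7), (3, 5)]

def Spec_sort_communities_by_size (partition : List (Int × Int)) (out : List Int) : Prop :=
  out = sort_communities_by_size_alt partition
instance (partition : List (Int × Int)) (out : List Int) :
    Decidable (Spec_sort_communities_by_size partition out) := by
  unfold Spec_sort_communities_by_size; infer_instance

-- ===== CLAIM (what is proved, stated in full; the proofs are below) =====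
def Claim_equal_sort_communities_by_size : Prop :=
  ∀ (partition : List (Int × Int)), Dom_sort_communities_by_size partition →
    Pre_sort_communities_by_size partition →
    Spec_sort_communities_by_size partition (sort_communities_by_size partition)

-- ===== LEMMAS AND PROOFS =====

-- unfolding step of insertBy on a cons
theorem insertBy_cons {α : Type} (before : α → α → Bool) (x y : α) (ys : List α) :
    PySem.List.insertBy before x (y :: ys)
      = if before x y then x :: y :: ys else y :: PySem.List.insertBy before x ys := by
  simp [PySem.List.insertBy]

-- insertBy walks past a prefix it does not insert into
theorem insertBy_append_not {α : Type} (before : α → α → Bool) (x : α) (l r : List α)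
    (h : ∀ y ∈ l, before x y = false) :
    PySem.List.insertBy before x (l ++ r) = l ++ PySem.List.insertBy before x r := by
  induction l with
  | nil => simp
  | cons y t ih =>
    simp [insertBy_cons, h y (by simp), ih (fun z hz => h z (by simp [hz]))]

-- insertBy inserts at the front when it goes before everything
theorem insertBy_front {α : Type} (before : α → α → Bool) (x : α) (r : List α)
    (h : ∀ y ∈ r, before x y = true) :
    PySem.List.insertBy before x r = x :: r := by
  cases r with
  | nil => simp [PySem.List.insertBy]
  | cons y t => simp [insertBy_cons, h y (by simp)]

-- inserting x into the bucketed output appends it to the end of its own bucket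
theorem insertBy_flatMap_filter {α : Type} (key : α → Int) (x : α) (vals : List Int)
    (hv : vals.Pairwise (· > ·)) (hx : key x ∈ vals) (ks : List α) :
    PySem.List.insertBy (fun a b => decide (key b < key a)) x
        (vals.flatMap (fun v => ks.filter (fun c => decide (key c = v))))
      = vals.flatMap (fun v => (ks ++ [x]).filter (fun c => decide (key c = v))) := by
  induction vals with
  | nil => simp at hx
  | cons v vs ih =>
    have hvs : ∀ u ∈ vs, u < v := fun u hu => (List.pairwise_cons.1 hv).1 u hu
    simp only [List.flatMap_cons]
    by_cases hxv : key x = v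
    · -- x goes to the end of bucket v; buckets in vs unchanged
      have h1 : ∀ y ∈ ks.filter (fun c => decide (key c = v)),
          (fun a b => decide (key b < key a)) x y = false := by
        intro y hy
        have := (List.mem_filter.1 hy).2
        simp at this ⊢
        omega
      have h2 : ∀ y ∈ vs.flatMap (fun u => ks.filter (fun c => decide (key c = u))),
          (fun a b => decide (key b < key a)) x y = true := by
        intro y hy
        obtain ⟨u, hu, hyu⟩ := List.mem_flatMap.1 hy
        have := (List.mem_filter.1 hyu).2
        have := hvs u hu
        simp_all
      rw [insertBy_append_not _ _ _ _ h1, insertBy_front _ _ _ h2]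
      have h3 : vs.flatMap (fun u => (ks ++ [x]).filter (fun c => decide (key c = u)))
          = vs.flatMap (fun u => ks.filter (fun c => decide (key c = u))) := by
        apply List.flatMap_congr
        intro u hu
        have : key x ≠ u := by have := hvs u hu; omega
        simp [List.filter_append, this]
      rw [h3]
      simp [List.filter_append, hxv]
    · -- bucket v unchanged; recurse into vs
      have hx' : key x ∈ vs := by cases List.mem_cons.1 hx with
        | inl h => exact absurd h hxv
        | inr h => exact h
      have hlt : key x < v := hvs _ hx'
      have h1 : ∀ y ∈ ks.filter (fun c => decide (key c = v)),
          (fun a b => decide (key b < key a)) x y = false := by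
        intro y hy
        have hk := (List.mem_filter.1 hy).2
        simp only [decide_eq_true_eq] at hk
        simp only [decide_eq_false_iff_not, not_lt]
        rw [hk]; omega
      rw [insertBy_append_not _ _ _ _ h1, ih (List.pairwise_cons.1 hv).2 hx']
      simp [List.filter_append, hxv]

-- the stable descending sort IS the bucket concatenation
theorem sorted_rev_eq_flatMap_filter {α : Type} (key : α → Int) (vals : List Int)
    (hv : vals.Pairwise (· > ·)) (ks : List α) (hk : ∀ c ∈ ks, key c ∈ vals) :
    PySem.List.sorted ks key true
      = vals.flatMap (fun v => ks.filter (fun c => decide (key c = v))) := by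
  induction ks using List.reverseRecOn with
  | nil => rw [(PySem.List.sorted_eq_nil_iff [] key true).2 rfl]; simp
  | append_singleton ks x ih =>
    rw [PySem.List.sorted_rev_eq_foldl_insertBy, List.foldl_append]
    simp only [List.foldl_cons, List.foldl_nil]
    rw [← PySem.List.sorted_rev_eq_foldl_insertBy,
        ih (fun c hc => hk c (by simp [hc])),
        insertBy_flatMap_filter key x vals hv (hk x (by simp)) ks]

theorem pyRange_down (m : Int) :
    PySem.List.pyRange m 0 (-1) = (List.range m.toNat).map (fun k : Nat => m - (k : Int)) := by
  simp only [PySem.List.pyRange]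
  norm_num
  split_ifs with h
  · exact List.map_congr_left fun k _ => by ring
  · have : m.toNat = 0 := by omega
    simp [this]

theorem mem_pyRange_down {m v : Int} (h1 : 0 < v) (h2 : v ≤ m) :
    v ∈ PySem.List.pyRange m 0 (-1) := by
  rw [pyRange_down]
  refine List.mem_map.2 ⟨(m - v).toNat, List.mem_range.2 ?_, ?_⟩ <;> omega

theorem pyRange_down_pairwise (m : Int) :
    (PySem.List.pyRange m 0 (-1)).Pairwise (· > ·) := by
  rw [pyRange_down]
  exact List.Pairwise.map _ (fun a b h => by omega) (List.pairwise_lt_range)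

theorem ports_agree (partition : List (Int × Int)) :
    sort_communities_by_size partition = sort_communities_by_size_alt partition := by
  by_cases hpne : partition = []
  · subst hpne; rfl
  set cs : List Int := partition.map (fun p => p.2) with hcs
  set key : Int → Int := fun c => ((cs.count c : Int)) with hkey
  set ks : List Int := PySem.Set.ofList cs with hks
  -- A's dict facts
  have hAd : ∀ c, (partition.foldl (fun d p => d.modify p.2 [] (fun l => l ++ [p.1]))
      PySem.Dict.empty).getD c [] = (partition.filter (fun p => p.2 == c)).map (fun p => p.1) := by
    intro c
    have h1 : partition.foldl (fun d p => d.modify p.2 [] (fun l => l ++ [p.1])) PySem.Dict.empty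
        = (partition.map (fun p => (p.2, p.1))).foldl
            (fun d q => d.modify q.1 [] (fun l => l ++ [q.2])) PySem.Dict.empty := by
      rw [List.foldl_map]
    rw [h1, PySem.Dict.getD_foldl_modify_append]
    simp [List.filter_map, List.map_map, Function.comp_def]
  have hAkeys : (partition.foldl (fun d p => d.modify p.2 [] (fun l => l ++ [p.1]))
      PySem.Dict.empty).keys = ks := by
    rw [PySem.Dict.keys_foldl_modify_key partition (fun p => p.2) []
      (fun _ p => (fun l => l ++ [p.1]))]
    simp [PySem.Set.update_nil_left, hks, hcs]
  have hAfun : (fun c => PySem.List.len ((partition.foldl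
        (fun d p => d.modify p.2 [] (fun l => l ++ [p.1])) PySem.Dict.empty).getD c [])) = key := by
    funext c
    rw [hAd c]
    simp [PySem.List.len, hkey, hcs, List.count, List.countP_map, Function.comp_def,
      ← List.countP_eq_length_filter]
  have hA : sort_communities_by_size partition = PySem.List.sorted ks key true := by
    unfold sort_communities_by_size; simp only []
    rw [hAkeys, hAfun]
  -- B's dict facts
  have hBc : partition.foldl (fun d p => d.insert p.2 (d.getD p.2 0 + 1)) PySem.Dict.empty
      = PySem.Dict.counter cs := by
    rw [← PySem.Dict.foldl_insert_getD_add_one_eq_counter, hcs, List.foldl_map]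
  have hitems : (PySem.Dict.counter cs).items = ks.map (fun k => (k, key k)) := by
    rw [PySem.Dict.items_counter]
  have hvalues : (PySem.Dict.counter cs).values = ks.map key := by
    rw [PySem.Dict.values_eq_map_keys (PySem.Dict.counter cs) (by
      rw [PySem.Dict.keys_counter, ← hks]; exact PySem.Set.nodup_ofList cs) 0,
      PySem.Dict.keys_counter, ← hks]
    exact List.map_congr_left fun k _ => by simp [PySem.Dict.getD_counter, hkey]
  have hcsne : cs ≠ [] := by simp [hcs, hpne]
  have hksne : ks ≠ [] := by
    obtain ⟨x, hx⟩ := List.exists_mem_of_ne_nil cs hcsne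
    exact List.ne_nil_of_mem ((PySem.Set.mem_ofList _ _).2 hx)
  have hsize : ¬ PySem.Dict.size (PySem.Dict.counter cs) = 0 := by
    simp [PySem.Dict.size, hitems, hksne]
  -- the maximum community size
  obtain ⟨m, hm⟩ : ∃ m, PySem.List.max? (ks.map key) (fun v => v) = some m := by
    cases h : PySem.List.max? (ks.map key) (fun v => v) with
    | none =>
      rw [PySem.List.max?_eq_none_iff] at h
      simp [hksne] at h
    | some m => exact ⟨m, rfl⟩
  have hmmax := PySem.List.max?_isMax hm
  have hcount_pos : ∀ c ∈ ks, 0 < key c := by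
    intro c hc
    have : c ∈ cs := (PySem.Set.mem_ofList _ _).1 hc
    simpa [hkey] using this
  have hbound : ∀ c ∈ ks, key c ≤ m := by
    intro c hc
    exact hmmax (key c) (List.mem_map_of_mem hc)
  -- the buckets hold exactly the communities of each size, in first-appearance order
  have hbuck : ∀ v, ((PySem.Dict.counter cs).items.foldl
      (fun b p => b.modify p.2 [] (fun l => l ++ [p.1])) PySem.Dict.empty).getD v []
      = ks.filter (fun c => decide (key c = v)) := by
    intro v
    have h1 : (PySem.Dict.counter cs).items.foldl
        (fun b p => b.modify p.2 [] (fun l => l ++ [p.1])) PySem.Dict.empty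
        = ((PySem.Dict.counter cs).items.map (fun p => (p.2, p.1))).foldl
            (fun d q => d.modify q.1 [] (fun l => l ++ [q.2])) PySem.Dict.empty := by
      rw [List.foldl_map]
    rw [h1, PySem.Dict.getD_foldl_modify_append, hitems]
    rw [List.map_map]
    simp only [Function.comp_def, PySem.Dict.getD_empty, List.nil_append, List.filter_map,
      List.map_map]
    rw [List.map_id']
    rfl
  have hB : sort_communities_by_size_alt partition = (PySem.List.pyRange m 0 (-1)).flatMap
      (fun v => ks.filter (fun c => decide (key c = v))) := by
    unfold sort_communities_by_size_alt; simp only []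
    rw [hBc, if_neg hsize, hvalues, hm]
    simp only [Option.getD_some]
    rw [PySem.List.foldl_append_eq_flatMap, List.nil_append]
    congr 1
    funext v
    exact hbuck v
  rw [hA, hB]
  exact sorted_rev_eq_flatMap_filter key _ (pyRange_down_pairwise m) ks
    (fun c hc => mem_pyRange_down (hcount_pos c hc) (hbound c hc))

-- ===== VERDICT (by name: the statement is the Claim_ definition above) =====
theorem sort_communities_by_size_spec : Claim_equal_sort_communities_by_size := by
  intro partition _ _
  unfold Spec_sort_communities_by_size
  exact ports_agree partition
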